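-- pv_equiv track=rewrite | github.com/ajaysridhar0/langtable_long_horizon_datagen | language_table/environments/rewards/long_horizon.py | _fixed_mixed_block_order
-- ===== SOURCE A (Python) =====
-- from typing import Any, Dict, List, Optional, Sequence, Tuple
--
-- def _block_color(block_name: str) -> str:
--   return block_name.split("_")[0]
--
-- def _fixed_mixed_block_order(blocks_on_table: Sequence[str]) -> List[str]:
--   """Deterministic mixed ordering (round-robin by color)."""
--   colors = sorted({_block_color(block) for block in blocks_on_table})
--   buckets: Dict[str, List[str]] = {
--       color: sorted([block for block in blocks_on_table if _block_color(block) == color])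
--       for color in colors
--   }
--   ordered: List[str] = []
--   while True:
--     appended = False
--     for color in colors:
--       bucket = buckets.get(color, [])
--       if not bucket:
--         continue
--       ordered.append(bucket.pop(0))
--       appended = True
--     if not appended:
--       break
--   return ordered
-- ===== SOURCE B (Python) =====
-- from typing import Dict, List, Sequence
--
--
-- def _block_color(block_name: str) -> str:
--   return block_name.split("_")[0]
--
--
-- def _fixed_mixed_block_order(blocks_on_table: Sequence[str]) -> List[str]:
--   """Deterministic mixed ordering (round-robin by color)."""
--   buckets: Dict[str, List[str]] = {}
--   for block in blocks_on_table:
--     buckets.setdefault(_block_color(block), []).append(block)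
--   colors = sorted(buckets)
--   for color in colors:
--     buckets[color].sort()
--   m = max((len(buckets[color]) for color in colors), default=0)
--   return [buckets[color][i] for i in range(m) for color in colors
--           if i < len(buckets[color])]
-- ===== Notes on version B (the rewrite author's own statement) =====
-- stated objective: faster
-- what changed: B builds the color buckets in one grouping pass over the list (setdefault/append), sorts each bucket once, and emits the round-robin order with an index-based comprehension, instead of A's per-color filter passes and repeated whole-dict pop(0) sweeps.
import Mathlib
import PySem

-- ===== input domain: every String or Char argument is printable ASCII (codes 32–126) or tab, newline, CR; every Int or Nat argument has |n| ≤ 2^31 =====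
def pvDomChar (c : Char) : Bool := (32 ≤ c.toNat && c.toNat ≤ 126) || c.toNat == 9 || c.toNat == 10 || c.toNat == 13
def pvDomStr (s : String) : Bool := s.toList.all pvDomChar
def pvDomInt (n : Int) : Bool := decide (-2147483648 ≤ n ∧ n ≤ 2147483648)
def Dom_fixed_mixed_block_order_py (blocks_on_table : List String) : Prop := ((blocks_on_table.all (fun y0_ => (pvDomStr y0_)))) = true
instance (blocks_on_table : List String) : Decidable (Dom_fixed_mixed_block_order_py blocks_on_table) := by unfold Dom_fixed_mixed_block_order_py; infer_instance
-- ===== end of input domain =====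

-- B replaces A's per-color filter passes and repeated pop(0) sweeps by one grouping pass,
-- per-bucket sorts and an index-based round-robin comprehension (objective: faster).

-- shared helper: _block_color(block) = block.split("_")[0]
def blockColor (block_name : String) : String :=
  ((PySem.Str.split? block_name "_").getD []).headD ""

-- ===== PORT A =====
-- one pass of A's inner `for color in colors` loop over the state (buckets, ordered, appended)
def passA (colors : List String)
    (st : PySem.Dict String (List String) × List String × Bool) :
    PySem.Dict String (List String) × List String × Bool :=
  colors.foldl (fun st c =>
    let bucket := st.1.getD c []
    match bucket with
    | [] => st
    | x :: rest => (st.1.insert c rest, st.2.1 ++ [x], true)) st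

-- behaviour of one pass (also used by aLoop's termination proof)
theorem passA_spec (colors : List String) (h : colors.Nodup)
    (d : PySem.Dict String (List String)) (ord : List String) (ap : Bool) :
    (passA colors (d, ord, ap)).2.1 = ord ++ colors.filterMap (fun c => (d.getD c []).head?) ∧
    (passA colors (d, ord, ap)).2.2 = (ap || colors.any (fun c => !(d.getD c []).isEmpty)) ∧
    (∀ c', (passA colors (d, ord, ap)).1.getD c' [] =
      if c' ∈ colors then (d.getD c' []).tail else d.getD c' []) := by
  induction colors generalizing d ord ap with
  | nil => simp [passA]
  | cons c cs ih =>
    have hc : c ∉ cs := (List.nodup_cons.mp h).1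
    have hcs : cs.Nodup := (List.nodup_cons.mp h).2
    cases hcur : d.getD c [] with
    | nil =>
      obtain ⟨i1, i2, i3⟩ := ih hcs d ord ap
      refine ⟨?_, ?_, ?_⟩
      · simpa [passA, hcur] using i1
      · simpa [passA, hcur] using i2
      · intro c'
        have h3 := i3 c'
        simp only [passA] at h3 ⊢
        simp only [List.foldl_cons, hcur]
        rw [h3]
        by_cases hcc : c' = c
        · subst hcc
          simp [hc, hcur]
        · simp [hcc]
    | cons x rest =>
      obtain ⟨i1, i2, i3⟩ := ih hcs (d.insert c rest) (ord ++ [x]) true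
      refine ⟨?_, ?_, ?_⟩
      · have hfm : cs.filterMap (fun c' => (((d.insert c rest).getD c' []).head?)) =
            cs.filterMap (fun c' => ((d.getD c' []).head?)) := by
          apply List.filterMap_congr
          intro c' hm
          have hne : c' ≠ c := fun he => hc (he ▸ hm)
          rw [PySem.Dict.getD_insert]
          simp [hne]
        simp only [passA] at i1 ⊢
        simp only [List.foldl_cons, hcur]
        rw [i1, hfm]
        simp [hcur]
      · have hany : cs.any (fun c' => !((d.insert c rest).getD c' []).isEmpty) =
            cs.any (fun c' => !(d.getD c' []).isEmpty) := by
          apply PySem.List.any_congr_mem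
          intro c' hm
          have hne : c' ≠ c := fun he => hc (he ▸ hm)
          rw [PySem.Dict.getD_insert]
          simp [hne]
        simp only [passA] at i2 ⊢
        simp only [List.foldl_cons, hcur]
        rw [i2, hany]
        simp [hcur]
      · intro c'
        have h3 := i3 c'
        simp only [passA] at h3 ⊢
        simp only [List.foldl_cons, hcur]
        rw [h3]
        by_cases hcc : c' = c
        · subst hcc
          simp [hc, PySem.Dict.getD_insert, hcur]
        · rw [PySem.Dict.getD_insert]
          simp [hcc]

-- the measure A's while-loop shrinks: total number of blocks still in the buckets
def bucketsMeasure (colors : List String) (d : PySem.Dict String (List String)) : Nat :=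
  (colors.map (fun c => (d.getD c []).length)).sum

theorem passA_measure (colors : List String) (h : colors.Nodup)
    (d : PySem.Dict String (List String)) (ord : List String)
    (hap : (passA colors (d, ord, false)).2.2 = true) :
    bucketsMeasure colors (passA colors (d, ord, false)).1 < bucketsMeasure colors d := by
  obtain ⟨-, h2, h3⟩ := passA_spec colors h d ord false
  rw [hap] at h2
  unfold bucketsMeasure
  apply List.sum_lt_sum
  · intro c hm
    rw [h3 c]
    simp [hm, List.length_tail]
  · rcases List.any_eq_true.mp h2.symm with ⟨c, hm, hne⟩
    refine ⟨c, hm, ?_⟩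
    rw [h3 c]
    simp only [hm, if_pos]
    cases hcur : d.getD c [] with
    | nil => rw [hcur] at hne; simp at hne
    | cons a l => simp

-- A's `while True` loop
def aLoop (colors : List String) (hnd : colors.Nodup)
    (d : PySem.Dict String (List String)) (ordered : List String) : List String :=
  let st := passA colors (d, ordered, false)
  if hap : st.2.2 = true then aLoop colors hnd st.1 st.2.1 else st.2.1
termination_by bucketsMeasure colors d
decreasing_by exact passA_measure colors hnd d ordered hap

def fixed_mixed_block_order_py (blocks_on_table : List String) : List String :=
  let colors : List String :=
    PySem.List.sorted (PySem.Set.ofList (blocks_on_table.map blockColor)) id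
  let buckets : PySem.Dict String (List String) :=
    colors.foldl (fun d c =>
      d.insert c (PySem.List.sorted
        (blocks_on_table.filter (fun block => blockColor block == c)) id))
      PySem.Dict.empty
  aLoop colors
    (((PySem.List.sorted_perm _ id false).nodup_iff).mpr
      (PySem.Set.nodup_ofList (blocks_on_table.map blockColor)))
    buckets []

-- ===== PORT B =====
def fixed_mixed_block_order_py_alt (blocks_on_table : List String) : List String :=
  let buckets : PySem.Dict String (List String) :=
    blocks_on_table.foldl
      (fun d block => d.modify (blockColor block) [] (fun l => l ++ [block]))
      PySem.Dict.empty
  let colors : List String := PySem.List.sorted buckets.keys id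
  let buckets2 : PySem.Dict String (List String) :=
    colors.foldl (fun d c => d.insert c (PySem.List.sorted (d.getD c []) id)) buckets
  let m : Nat := (colors.map (fun c => (buckets2.getD c []).length)).foldl max 0
  (List.range m).flatMap (fun i =>
    colors.filterMap (fun c => (buckets2.getD c [])[i]?))

-- ===== PRECONDITION & SPEC =====
def Spec_fixed_mixed_block_order_py (blocks_on_table : List String) (out : List String) : Prop := out = fixed_mixed_block_order_py_alt blocks_on_table
instance (blocks_on_table : List String) (out : List String) : Decidable (Spec_fixed_mixed_block_order_py blocks_on_table out) := by unfold Spec_fixed_mixed_block_order_py; infer_instance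

-- ===== CLAIM (what is proved, stated in full; the proofs are below) =====
def Claim_equal_fixed_mixed_block_order_py : Prop := ∀ (blocks_on_table : List String), Dom_fixed_mixed_block_order_py blocks_on_table → Spec_fixed_mixed_block_order_py blocks_on_table (fixed_mixed_block_order_py blocks_on_table)

-- ===== LEMMAS AND PROOFS =====

theorem tails_sum_lt (L : List (List String)) (h : ¬ L.all (·.isEmpty) = true) :
    ((L.map List.tail).map List.length).sum < (L.map List.length).sum := by
  rw [List.map_map]
  apply List.sum_lt_sum
  · intro l hm
    simp [List.length_tail]
  · simp only [List.all_eq_true] at h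
    push_neg at h
    rcases h with ⟨l, hm, hne⟩
    refine ⟨l, hm, ?_⟩
    cases l with
    | nil => simp at hne
    | cons a t => simp [Function.comp]

-- the common abstraction: pure round-robin over a list of buckets
def rr (L : List (List String)) : List String :=
  if h : L.all (·.isEmpty) then []
  else L.filterMap List.head? ++ rr (L.map List.tail)
termination_by (L.map List.length).sum
decreasing_by simpa using tails_sum_lt L h

theorem aLoop_eq_rr (colors : List String) (hnd : colors.Nodup)
    (d : PySem.Dict String (List String)) (ord : List String) :
    aLoop colors hnd d ord = ord ++ rr (colors.map (fun c => d.getD c [])) := by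
  generalize hn : bucketsMeasure colors d = n
  induction n using Nat.strong_induction_on generalizing d ord with
  | _ n ih =>
  obtain ⟨h1, h2, h3⟩ := passA_spec colors hnd d ord false
  rw [aLoop]
  by_cases hap : (passA colors (d, ord, false)).2.2 = true
  · have hdec : bucketsMeasure colors (passA colors (d, ord, false)).1 < n :=
      hn ▸ passA_measure colors hnd d ord hap
    rw [dif_pos hap, ih _ hdec _ _ rfl]
    have hmap : colors.map (fun c => (passA colors (d, ord, false)).1.getD c []) =
        (colors.map (fun c => d.getD c [])).map List.tail := by
      rw [List.map_map]
      apply List.map_congr_left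
      intro c hm
      simp [h3 c, hm]
    rw [hmap, h1]
    have hne : ¬ (colors.map (fun c => d.getD c [])).all (·.isEmpty) = true := by
      rw [hap] at h2
      rcases List.any_eq_true.mp h2.symm with ⟨c, hm, hcne⟩
      simp only [List.all_eq_true, List.mem_map]
      push_neg
      exact ⟨d.getD c [], ⟨c, hm, rfl⟩, by simpa using hcne⟩
    conv_rhs => rw [rr.eq_def]
    rw [dif_neg hne]
    simp [List.filterMap_map, Function.comp_def]
  · rw [dif_neg hap]
    simp only [Bool.not_eq_true] at hap
    rw [hap] at h2
    have hall : ∀ c ∈ colors, d.getD c [] = [] := by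
      intro c hm
      by_contra hne
      have : colors.any (fun c => !(d.getD c []).isEmpty) = true :=
        List.any_eq_true.mpr ⟨c, hm, by simpa [List.isEmpty_iff] using hne⟩
      simp [this] at h2
    have hallE : (colors.map (fun c => d.getD c [])).all (·.isEmpty) = true := by
      simp only [List.all_eq_true, List.mem_map]
      rintro l ⟨c, hm, rfl⟩
      simp [hall c hm]
    rw [rr.eq_def, dif_pos hallE, h1]
    have hemp : colors.filterMap (fun c => (d.getD c []).head?) = [] := by
      rw [List.filterMap_eq_nil_iff]
      intro c hm
      simp [hall c hm]
    simp [hemp]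

-- getD through B's grouping loop
theorem getD_group (blocks : List String) (c : String) :
    (blocks.foldl (fun d block => d.modify (blockColor block) [] (fun l => l ++ [block]))
      (PySem.Dict.empty : PySem.Dict String (List String))).getD c [] =
      blocks.filter (fun block => blockColor block == c) := by
  have hfold : blocks.foldl
      (fun d block => d.modify (blockColor block) [] (fun l => l ++ [block]))
      (PySem.Dict.empty : PySem.Dict String (List String)) =
      (blocks.map (fun b => (blockColor b, b))).foldl
        (fun d p => d.modify p.1 [] (fun l => l ++ [p.2])) PySem.Dict.empty := by
    rw [List.foldl_map]
  rw [hfold, PySem.Dict.getD_foldl_modify_append]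
  simp only [List.filter_map, List.map_map, Function.comp_def]
  simp [PySem.Dict.getD, PySem.Dict.get?, PySem.Dict.empty]

-- getD through A's bucket-building loop (insert of a value not depending on the dict)
theorem getD_foldl_insert_const (F : String → List String) (colors : List String)
    (hnd : colors.Nodup) (d : PySem.Dict String (List String)) (c' : String) :
    (colors.foldl (fun d c => d.insert c (F c)) d).getD c' [] =
      if c' ∈ colors then F c' else d.getD c' [] := by
  induction colors generalizing d with
  | nil => simp
  | cons c cs ih =>
    have hc : c ∉ cs := (List.nodup_cons.mp hnd).1
    rw [List.foldl_cons, ih (List.nodup_cons.mp hnd).2]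
    by_cases hcc : c' = c
    · subst hcc
      simp [hc, PySem.Dict.getD_insert]
    · rw [PySem.Dict.getD_insert]
      simp [hcc]

-- getD through B's per-bucket sorting loop
theorem getD_foldl_insert_sort (colors : List String) (hnd : colors.Nodup)
    (d : PySem.Dict String (List String)) (c' : String) :
    (colors.foldl (fun d c => d.insert c (PySem.List.sorted (d.getD c []) id)) d).getD c' [] =
      if c' ∈ colors then PySem.List.sorted (d.getD c' []) id else d.getD c' [] := by
  induction colors generalizing d with
  | nil => simp
  | cons c cs ih =>
    have hc : c ∉ cs := (List.nodup_cons.mp hnd).1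
    rw [List.foldl_cons, ih (List.nodup_cons.mp hnd).2]
    by_cases hcc : c' = c
    · subst hcc
      simp [hc, PySem.Dict.getD_insert]
    · rw [PySem.Dict.getD_insert]
      simp [hcc]

-- maxlen facts
theorem foldl_max_zero_iff (ns : List Nat) (a : Nat) :
    ns.foldl max a = 0 ↔ a = 0 ∧ ∀ n ∈ ns, n = 0 := by
  induction ns generalizing a with
  | nil => simp
  | cons n t ih =>
    simp only [List.foldl_cons, ih, List.mem_cons]
    constructor
    · rintro ⟨h1, h2⟩
      exact ⟨by omega, fun m hm => hm.elim (fun he => by omega) (h2 m)⟩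
    · rintro ⟨h1, h2⟩
      exact ⟨by have := h2 n (Or.inl rfl); omega, fun m hm => h2 m (Or.inr hm)⟩

theorem foldl_max_sub_one (ns : List Nat) (a : Nat) :
    (ns.map (fun n => n - 1)).foldl max (a - 1) = ns.foldl max a - 1 := by
  induction ns generalizing a with
  | nil => simp
  | cons n t ih =>
    simp only [List.map_cons, List.foldl_cons]
    rw [show max (a - 1) (n - 1) = max a n - 1 by omega, ih]

-- pure fact: round-robin equals B's index-based comprehension
theorem rr_eq_range (L : List (List String)) :
    rr L = (List.range ((L.map List.length).foldl max 0)).flatMap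
      (fun i => L.filterMap (fun l => l[i]?)) := by
  generalize hn : (L.map List.length).foldl max 0 = n
  induction n generalizing L with
  | zero =>
    have hall : L.all (·.isEmpty) = true := by
      simp only [List.all_eq_true]
      intro l hm
      have hz := (foldl_max_zero_iff (L.map List.length) 0).mp hn
      have hl : l.length = 0 := hz.2 _ (List.mem_map_of_mem hm)
      simpa [List.isEmpty_iff] using List.eq_nil_of_length_eq_zero hl
    rw [rr.eq_def, dif_pos hall]
    simp
  | succ n ih =>
    have hne : ¬ L.all (·.isEmpty) = true := by
      intro hall
      have hz : (L.map List.length).foldl max 0 = 0 := by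
        apply (foldl_max_zero_iff _ _).mpr
        refine ⟨rfl, ?_⟩
        simp only [List.mem_map]
        rintro k ⟨l, hm, rfl⟩
        have he := (List.all_eq_true.mp hall) l hm
        simp only [List.isEmpty_iff] at he
        simp [he]
      omega
    rw [rr.eq_def, dif_neg hne]
    have htails : ((L.map List.tail).map List.length).foldl max 0 = n := by
      have hmt : (L.map List.tail).map List.length =
          (L.map List.length).map (fun k => k - 1) := by
        simp [List.map_map, Function.comp_def, List.length_tail]
      rw [hmt, show (0 : Nat) = 0 - 1 by rfl, foldl_max_sub_one, hn]
      omega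
    rw [ih (L.map List.tail) htails, List.range_succ_eq_map]
    rw [List.flatMap_cons]
    congr 1
    · apply List.filterMap_congr
      intro l hm
      simp [List.head?_eq_getElem?]
    · rw [List.flatMap_map]
      apply List.flatMap_congr
      intro i hm
      rw [List.filterMap_map]
      simp [Function.comp_def, List.getElem?_tail]

-- proof-side abbreviations: the sorted color list and the sorted per-color buckets
def Ccolors (blocks : List String) : List String :=
  PySem.List.sorted (PySem.Set.ofList (blocks.map blockColor)) id

def Fbuckets (blocks : List String) : String → List String :=
  fun c => PySem.List.sorted (blocks.filter (fun block => blockColor block == c)) id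

theorem nodup_Ccolors (blocks : List String) : (Ccolors blocks).Nodup :=
  ((PySem.List.sorted_perm _ id false).nodup_iff).mpr
    (PySem.Set.nodup_ofList (blocks.map blockColor))

theorem portA_eq_rr (blocks : List String) :
    fixed_mixed_block_order_py blocks =
      rr ((Ccolors blocks).map (Fbuckets blocks)) := by
  unfold fixed_mixed_block_order_py
  rw [aLoop_eq_rr _ _ _ _, List.nil_append]
  congr 1
  apply List.map_congr_left
  intro c hm
  have h := getD_foldl_insert_const
    (fun c => PySem.List.sorted (blocks.filter (fun block => blockColor block == c)) id)
    (Ccolors blocks) (nodup_Ccolors blocks) PySem.Dict.empty c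
  simp only [Ccolors] at h hm
  simp only [hm, if_pos] at h
  rw [h]
  rfl

theorem portB_eq_rr (blocks : List String) :
    fixed_mixed_block_order_py_alt blocks =
      rr ((Ccolors blocks).map (Fbuckets blocks)) := by
  have hkeys : (blocks.foldl
      (fun d block => d.modify (blockColor block) [] (fun l => l ++ [block]))
      (PySem.Dict.empty : PySem.Dict String (List String))).keys =
      PySem.Set.ofList (blocks.map blockColor) := by
    rw [PySem.Dict.keys_foldl_modify_key]
    have : (PySem.Dict.empty : PySem.Dict String (List String)).keys = [] := rfl
    rw [this, PySem.Set.update_nil_left]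
  simp only [fixed_mixed_block_order_py_alt]
  rw [hkeys,
    show PySem.List.sorted (PySem.Set.ofList (blocks.map blockColor)) id = Ccolors blocks from rfl]
  have hgetD2 : ∀ c ∈ Ccolors blocks,
      ((Ccolors blocks).foldl
        (fun d c => d.insert c (PySem.List.sorted (d.getD c []) id))
        (blocks.foldl
          (fun d block => d.modify (blockColor block) [] (fun l => l ++ [block]))
          PySem.Dict.empty)).getD c [] = Fbuckets blocks c := by
    intro c hm
    rw [getD_foldl_insert_sort _ (nodup_Ccolors blocks), if_pos hm, getD_group]
    rfl
  have hm' : ((Ccolors blocks).map (fun c =>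
      (((Ccolors blocks).foldl
        (fun d c => d.insert c (PySem.List.sorted (d.getD c []) id))
        (blocks.foldl
          (fun d block => d.modify (blockColor block) [] (fun l => l ++ [block]))
          PySem.Dict.empty)).getD c []).length)).foldl max 0 =
      ((((Ccolors blocks).map (Fbuckets blocks)).map List.length).foldl max 0) := by
    rw [List.map_map]
    congr 1
    apply List.map_congr_left
    intro c hm
    simp [hgetD2 c hm]
  rw [hm', rr_eq_range]
  apply List.flatMap_congr
  intro i _
  rw [List.filterMap_map]
  apply List.filterMap_congr
  intro c hm
  simp [Function.comp, hgetD2 c hm]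

-- ===== VERDICT (by name: the statement is the Claim_ definition above) =====
theorem fixed_mixed_block_order_py_spec : Claim_equal_fixed_mixed_block_order_py := by
  intro blocks _hdom
  unfold Spec_fixed_mixed_block_order_py
  rw [portA_eq_rr, portB_eq_rr]
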